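-- pv_equiv track=rewrite | github.com/s243a/UnifyWeaver | src/unifyweaver/targets/python_runtime/utils.py | get_local
-- ===== SOURCE A (Python) =====
-- def get_local(data, local_name):
--     """Get value from data dict ignoring namespace prefixes.
--
--     Tries: exact match, @prefix, and any namespace:localname pattern.
--     Examples: 'title', '@title', 'dcterms:title', '@dcterms:title'
--
--     Args:
--         data: Dictionary containing attributes
--         local_name: The local name to search for (without namespace)
--
--     Returns:
--         The value if found, None otherwise
--     """
--     if local_name in data:
--         return data[local_name]
--     if f'@{local_name}' in data:
--         return data[f'@{local_name}']
--     suffix = f':{local_name}'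
--     for key in data:
--         if key.endswith(suffix):
--             return data[key]
--     return None
-- ===== SOURCE B (Python) =====
-- def get_local(data, local_name):
--     """Get value from data dict ignoring namespace prefixes (ranked single pass)."""
--     at_name = '@' + local_name
--     suffix = ':' + local_name
--     best_rank, best_value = 3, None
--     for key, value in data.items():
--         if key == local_name:
--             rank = 0
--         elif key == at_name:
--             rank = 1
--         elif key.endswith(suffix):
--             rank = 2
--         else:
--             continue
--         if rank < best_rank:
--             best_rank, best_value = rank, value
--     return best_value
-- ===== Notes on version B (the rewrite author's own statement) =====
-- stated objective: alternative
-- what changed: Replaced A's three sequential dict probes (exact, '@'-prefixed, then a scan for a ':local_name' suffix key) by a single ranked pass over the items that keeps the value of the smallest-rank key seen, updating only on strictly smaller rank.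
import Mathlib
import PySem

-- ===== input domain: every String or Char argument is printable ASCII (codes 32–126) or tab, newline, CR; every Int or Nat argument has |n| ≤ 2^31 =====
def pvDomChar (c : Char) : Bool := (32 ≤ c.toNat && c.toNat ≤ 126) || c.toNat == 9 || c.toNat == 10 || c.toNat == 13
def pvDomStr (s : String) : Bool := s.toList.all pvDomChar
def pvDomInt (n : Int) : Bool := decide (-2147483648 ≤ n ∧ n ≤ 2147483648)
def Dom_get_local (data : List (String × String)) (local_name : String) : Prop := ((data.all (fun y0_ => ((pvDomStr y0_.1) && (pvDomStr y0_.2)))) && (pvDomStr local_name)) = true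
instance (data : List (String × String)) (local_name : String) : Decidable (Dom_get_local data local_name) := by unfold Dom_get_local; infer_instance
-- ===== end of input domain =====

-- B replaces A's three sequential dict probes by one ranked pass over the items (objective: alternative decomposition).

-- ===== PORT A =====
-- Python dict lookup / membership on the association-list model: first match.
def dget (data : List (String × String)) (k : String) : Option String :=
  match data with
  | [] => none
  | (k', v) :: rest => if k' == k then some v else dget rest k

-- 'for key in data: if key.endswith(suffix): return data[key]'
def aLoop (data : List (String × String)) (suffix : String) : List (String × String) → Option String
  | [] => none
  | (k, _) :: rest =>
      if PySem.Str.endswith k suffix then dget data k else aLoop data suffix rest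

def get_local (data : List (String × String)) (local_name : String) : Option String :=
  match dget data local_name with
  | some v => some v
  | none =>
    match dget data ("@" ++ local_name) with
    | some v => some v
    | none => aLoop data (":" ++ local_name) data

-- ===== PORT B =====
def rankB (local_name k : String) : Nat :=
  if k == local_name then 0
  else if k == "@" ++ local_name then 1
  else if PySem.Str.endswith k (":" ++ local_name) then 2
  else 3

def stepB (local_name : String) (st : Nat × Option String) (kv : String × String) : Nat × Option String :=
  if rankB local_name kv.1 < st.1 then (rankB local_name kv.1, some kv.2) else st

def get_local_alt (data : List (String × String)) (local_name : String) : Option String :=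
  (data.foldl (stepB local_name) (3, none)).2

-- ===== PRECONDITION & SPEC =====
def Spec_get_local (data : List (String × String)) (local_name : String) (out : Option String) : Prop := out = get_local_alt data local_name
instance (data : List (String × String)) (local_name : String) (out : Option String) : Decidable (Spec_get_local data local_name out) := by unfold Spec_get_local; infer_instance

-- ===== CLAIM (what is proved, stated in full; the proofs are below) =====
def Claim_equal_get_local : Prop := ∀ (data : List (String × String)) (local_name : String), Dom_get_local data local_name → Spec_get_local data local_name (get_local data local_name)

-- ===== LEMMAS AND PROOFS =====

theorem rankB_self (n : String) : rankB n n = 0 := by simp [rankB]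

theorem rankB_at {n k : String} (hk : k = "@" ++ n) : rankB n k = 1 := by
  subst hk
  have hne : ("@" ++ n) ≠ n := by
    intro h
    have := congrArg String.length h
    simp [String.length_append] at this
  unfold rankB
  rw [if_neg (by simp [hne]), if_pos (by simp)]

theorem rankB_ge1 {n k : String} (hk : k ≠ n) : 1 ≤ rankB n k := by
  unfold rankB
  rw [if_neg (by simpa using hk)]
  split_ifs <;> omega

theorem rankB_ge2 {n k : String} (hk : k ≠ n) (ha : k ≠ "@" ++ n) : 2 ≤ rankB n k := by
  unfold rankB
  rw [if_neg (by simpa using hk), if_neg (by simpa using ha)]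
  split_ifs <;> omega

theorem rankB_eq2 {n k : String} (hk : k ≠ n) (ha : k ≠ "@" ++ n)
    (hs : PySem.Str.endswith k (":" ++ n) = true) : rankB n k = 2 := by
  unfold rankB
  rw [if_neg (by simpa using hk), if_neg (by simpa using ha), if_pos hs]

theorem rankB_eq3 {n k : String} (hk : k ≠ n) (ha : k ≠ "@" ++ n)
    (hs : PySem.Str.endswith k (":" ++ n) = false) : rankB n k = 3 := by
  unfold rankB
  rw [if_neg (by simpa using hk), if_neg (by simpa using ha), if_neg (by rw [hs]; simp)]

theorem fold0 (n : String) (l : List (String × String)) (bv : Option String) :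
    l.foldl (stepB n) (0, bv) = (0, bv) := by
  induction l with
  | nil => rfl
  | cons kv rest ih =>
      simp only [List.foldl_cons, stepB]
      rw [if_neg (by omega)]
      exact ih

theorem fold1 (n : String) (l : List (String × String)) (bv : Option String) :
    l.foldl (stepB n) (1, bv) =
      match dget l n with
      | some v => (0, some v)
      | none => (1, bv) := by
  induction l generalizing bv with
  | nil => rfl
  | cons kv rest ih =>
      obtain ⟨k, v⟩ := kv
      simp only [List.foldl_cons, stepB, dget]
      by_cases hk : k = n
      · subst hk
        rw [rankB_self, if_pos (by omega), if_pos (by simp), fold0]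
      · rw [if_neg (Nat.not_lt.mpr (rankB_ge1 hk)), if_neg (by simpa using hk)]
        exact ih bv

theorem fold2 (n : String) (l : List (String × String)) (bv : Option String) :
    l.foldl (stepB n) (2, bv) =
      match dget l n with
      | some v => (0, some v)
      | none =>
        match dget l ("@" ++ n) with
        | some v => (1, some v)
        | none => (2, bv) := by
  induction l generalizing bv with
  | nil => rfl
  | cons kv rest ih =>
      obtain ⟨k, v⟩ := kv
      simp only [List.foldl_cons, stepB, dget]
      by_cases hk : k = n
      · subst hk
        rw [rankB_self, if_pos (by omega), if_pos (by simp), fold0]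
      · by_cases ha : k = "@" ++ n
        · rw [rankB_at ha, if_pos (by omega), fold1, if_neg (by simpa using hk),
              if_pos (by simpa using ha)]
        · rw [if_neg (Nat.not_lt.mpr (rankB_ge2 hk ha)), if_neg (by simpa using hk),
              if_neg (by simpa using ha)]
          exact ih bv

theorem fold3 (n : String) (l : List (String × String)) :
    l.foldl (stepB n) (3, none) =
      match dget l n with
      | some v => (0, some v)
      | none =>
        match dget l ("@" ++ n) with
        | some v => (1, some v)
        | none =>
          match l.find? (fun p => PySem.Str.endswith p.1 (":" ++ n)) with
          | some p => (2, some p.2)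
          | none => (3, none) := by
  induction l with
  | nil => rfl
  | cons kv rest ih =>
      obtain ⟨k, v⟩ := kv
      simp only [List.foldl_cons, stepB, dget]
      by_cases hk : k = n
      · subst hk
        rw [rankB_self, if_pos (by omega), if_pos (by simp), fold0]
      · by_cases ha : k = "@" ++ n
        · rw [rankB_at ha, if_pos (by omega), fold1, if_neg (by simpa using hk),
              if_pos (by simpa using ha)]
        · by_cases hs : PySem.Str.endswith k (":" ++ n) = true
          · rw [rankB_eq2 hk ha hs, if_pos (by omega), fold2, if_neg (by simpa using hk),
                if_neg (by simpa using ha), List.find?_cons_of_pos (p := fun p => PySem.Str.endswith p.1 (":" ++ n)) (a := (k, v)) hs]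
          · have hsf : PySem.Str.endswith k (":" ++ n) = false := by simpa using hs
            rw [if_neg (by rw [rankB_eq3 hk ha hsf]; omega), if_neg (by simpa using hk),
                if_neg (by simpa using ha), List.find?_cons_of_neg (p := fun p => PySem.Str.endswith p.1 (":" ++ n)) (a := (k, v)) hs]
            exact ih

theorem dget_append_none (pre l : List (String × String)) (k : String)
    (h : ∀ p ∈ pre, p.1 ≠ k) : dget (pre ++ l) k = dget l k := by
  induction pre with
  | nil => rfl
  | cons q rest ih =>
      obtain ⟨k', v'⟩ := q
      simp only [List.cons_append, dget]
      rw [if_neg (by simpa using h (k', v') (by simp))]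
      exact ih (fun p hp => h p (by simp [hp]))

theorem aLoop_eq (n : String) (l pre : List (String × String))
    (h : ∀ p ∈ pre, PySem.Str.endswith p.1 (":" ++ n) = false) :
    aLoop (pre ++ l) (":" ++ n) l
      = (l.find? (fun p => PySem.Str.endswith p.1 (":" ++ n))).map (·.2) := by
  induction l generalizing pre with
  | nil => rfl
  | cons kv rest ih =>
      obtain ⟨k, v⟩ := kv
      simp only [aLoop]
      by_cases hs : PySem.Str.endswith k (":" ++ n) = true
      · rw [if_pos hs, List.find?_cons_of_pos (p := fun p => PySem.Str.endswith p.1 (":" ++ n)) (a := (k, v)) hs]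
        have hne : ∀ p ∈ pre, p.1 ≠ k := by
          intro p hp hpk
          have hpf := h p hp
          rw [hpk, hs] at hpf
          cases hpf
        rw [dget_append_none pre ((k, v) :: rest) k hne]
        simp [dget]
      · rw [if_neg hs, List.find?_cons_of_neg (p := fun p => PySem.Str.endswith p.1 (":" ++ n)) (a := (k, v)) hs]
        have h2 : ∀ p ∈ pre ++ [(k, v)], PySem.Str.endswith p.1 (":" ++ n) = false := by
          intro p hp
          rcases List.mem_append.mp hp with hp | hp
          · exact h p hp
          · simp at hp
            rw [hp]
            simpa using hs
        have hrec := ih (pre ++ [(k, v)]) h2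
        rw [List.append_assoc] at hrec
        exact hrec

-- ===== VERDICT (by name: the statement is the Claim_ definition above) =====
theorem get_local_spec : Claim_equal_get_local := by
  intro data n _
  unfold Spec_get_local get_local get_local_alt
  rw [fold3]
  have hloop := aLoop_eq n data [] (by simp)
  rw [List.nil_append] at hloop
  cases he : dget data n with
  | some v => rfl
  | none =>
    cases ha : dget data ("@" ++ n) with
    | some v => rfl
    | none =>
      rw [hloop]
      cases hf : data.find? (fun p => PySem.Str.endswith p.1 (":" ++ n)) <;> rfl
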